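-- pv_equiv track=rewrite | github.com/VeronikaStepovaya/lab1 | lab1/1lab.py | build_frequency_dict
-- ===== SOURCE A (Python) =====
-- from collections import Counter
--
-- def build_frequency_dict(texts, labels):
--     positive_texts = [texts[i] for i in range(len(labels)) if labels[i] == 1]
--     negative_texts = [texts[i] for i in range(len(labels)) if labels[i] == 0]
--
--     positive_words = ' '.join(positive_texts).split()
--     negative_words = ' '.join(negative_texts).split()
--
--     positive_freq = Counter(positive_words)
--     negative_freq = Counter(negative_words)
--
--     return positive_freq, negative_freq
-- ===== SOURCE B (Python) =====
-- from collections import Counter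
--
-- def build_frequency_dict(texts, labels):
--     # One combined Counter keyed by (label, word), partitioned afterwards.
--     tagged = [(labels[i], w)
--               for i in range(len(labels)) if labels[i] in (0, 1)
--               for w in texts[i].split()]
--     combined = Counter(tagged)
--     positive_freq = Counter({w: c for (lab, w), c in combined.items() if lab == 1})
--     negative_freq = Counter({w: c for (lab, w), c in combined.items() if lab == 0})
--     return positive_freq, negative_freq
-- ===== Notes on version B (the rewrite author's own statement) =====
-- stated objective: alternative
-- what changed: Instead of partitioning texts into two lists and joining/re-splitting each into its own Counter, B builds one list of (label, word) pairs, counts it with a single composite-key Counter, and then partitions that counter's items into the positive and negative frequency dicts.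
import Mathlib
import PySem

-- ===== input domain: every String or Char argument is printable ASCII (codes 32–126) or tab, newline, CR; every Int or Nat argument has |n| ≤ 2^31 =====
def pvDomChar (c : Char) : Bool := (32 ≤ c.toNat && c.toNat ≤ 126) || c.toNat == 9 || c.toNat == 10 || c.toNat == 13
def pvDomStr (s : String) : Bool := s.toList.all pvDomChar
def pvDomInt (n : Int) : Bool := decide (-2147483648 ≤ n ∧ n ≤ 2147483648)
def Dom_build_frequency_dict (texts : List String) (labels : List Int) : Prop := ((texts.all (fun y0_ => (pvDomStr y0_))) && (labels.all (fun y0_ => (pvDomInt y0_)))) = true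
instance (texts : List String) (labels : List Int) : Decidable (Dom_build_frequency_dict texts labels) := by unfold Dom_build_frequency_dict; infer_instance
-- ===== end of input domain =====

-- B replaces A's two partitioned word streams (list comprehensions + join + re-split + two Counters)
-- by ONE composite-key Counter over (label, word) pairs whose items are partitioned afterwards
-- (objective: alternative).

-- ===== PORT A =====
def build_frequency_dict (texts : List String) (labels : List Int) :
    (List (String × Int)) × (List (String × Int)) :=
  let positive_texts := ((PySem.List.pyRange 0 labels.length 1).filter
      (fun i => PySem.List.pyGetD labels i 0 == 1)).map (fun i => PySem.List.pyGetD texts i "")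
  let negative_texts := ((PySem.List.pyRange 0 labels.length 1).filter
      (fun i => PySem.List.pyGetD labels i 0 == 0)).map (fun i => PySem.List.pyGetD texts i "")
  let positive_words := PySem.Str.split₀ (PySem.Str.join " " positive_texts)
  let negative_words := PySem.Str.split₀ (PySem.Str.join " " negative_texts)
  ((PySem.Dict.counter positive_words).items, (PySem.Dict.counter negative_words).items)

-- ===== PORT B =====
-- the tagged (label, word) stream; 'labels[i] in (0, 1)' then 'texts[i].split()'
def build_frequency_dict_alt (texts : List String) (labels : List Int) :
    (List (String × Int)) × (List (String × Int)) :=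
  let tagged := (PySem.List.pyRange 0 labels.length 1).flatMap (fun i =>
    if PySem.List.pyGetD labels i 0 == 0 || PySem.List.pyGetD labels i 0 == 1 then
      (PySem.Str.split₀ (PySem.List.pyGetD texts i "")).map
        (fun w => (PySem.List.pyGetD labels i 0, w))
    else [])
  let combined := PySem.Dict.counter tagged
  -- Counter({w: c for (lab, w), c in combined.items() if lab == v}).items, as the filtered item list
  let positive_freq := (combined.items.filter (fun p => p.1.1 == 1)).map (fun p => (p.1.2, p.2))
  let negative_freq := (combined.items.filter (fun p => p.1.1 == 0)).map (fun p => (p.1.2, p.2))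
  (positive_freq, negative_freq)

-- ===== PRECONDITION & SPEC =====
-- Pre_ excludes exactly the inputs on which both Pythons raise IndexError:
-- some index i carrying label 0 or 1 has no texts[i].
def Pre_build_frequency_dict (texts : List String) (labels : List Int) : Prop :=
  ∀ i : Nat, i < labels.length → (labels[i]? = some 0 ∨ labels[i]? = some 1) → i < texts.length
instance (texts : List String) (labels : List Int) : Decidable (Pre_build_frequency_dict texts labels) := by unfold Pre_build_frequency_dict; infer_instance
def pvWitness_build_frequency_dict : List String × List Int := (["good day", "bad bad day"], [1, 0])

def Spec_build_frequency_dict (texts : List String) (labels : List Int) (out : (List (String × Int)) × (List (String × Int))) : Prop := out = build_frequency_dict_alt texts labels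
instance (texts : List String) (labels : List Int) (out : (List (String × Int)) × (List (String × Int))) : Decidable (Spec_build_frequency_dict texts labels out) := by unfold Spec_build_frequency_dict; infer_instance

-- ===== CLAIM (what is proved, stated in full; the proofs are below) =====
def Claim_equal_build_frequency_dict : Prop := ∀ (texts : List String) (labels : List Int), Dom_build_frequency_dict texts labels → Pre_build_frequency_dict texts labels → Spec_build_frequency_dict texts labels (build_frequency_dict texts labels)

-- ===== LEMMAS AND PROOFS =====

-- one-step unfoldings of split₀.go (cited everywhere below instead of raw simp-unfolds)
theorem pv_go_nil (cur : List Char) (accs : List (List Char)) :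
    PySem.Chars.split₀.go [] cur accs =
      (if cur.isEmpty then accs.reverse else (cur.reverse :: accs).reverse) := by
  simp [PySem.Chars.split₀.go]

theorem pv_go_cons (c : Char) (rest cur : List Char) (accs : List (List Char)) :
    PySem.Chars.split₀.go (c :: rest) cur accs =
      if PySem.Chars.isspace c then
        (if cur.isEmpty then PySem.Chars.split₀.go rest [] accs
         else PySem.Chars.split₀.go rest [] (cur.reverse :: accs))
      else PySem.Chars.split₀.go rest (c :: cur) accs := by
  simp [PySem.Chars.split₀.go]

-- split₀.go with a non-empty output accumulator is the accumulator (reversed) followed by the rest.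
theorem pv_go_acc (s : List Char) : ∀ cur accs,
    PySem.Chars.split₀.go s cur accs = accs.reverse ++ PySem.Chars.split₀.go s cur [] := by
  induction s with
  | nil =>
    intro cur accs
    rw [pv_go_nil cur accs, pv_go_nil cur []]
    by_cases h : cur.isEmpty <;> simp [h]
  | cons c rest ih =>
    intro cur accs
    rw [pv_go_cons c rest cur accs, pv_go_cons c rest cur []]
    by_cases hs : PySem.Chars.isspace c
    · by_cases h : cur.isEmpty
      · simp only [hs, h, if_true]
        exact ih [] accs
      · simp only [hs, h, if_true, if_false, Bool.false_eq_true]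
        rw [ih [] (cur.reverse :: accs), ih [] [cur.reverse]]
        simp
    · simp only [hs, Bool.false_eq_true, if_false]
      exact ih _ accs

-- splitting at an explicit blank: go (s ++ ' ' :: t) = go s ++ go t.
theorem pv_go_append_space (t : List Char) : ∀ (s : List Char) (cur : List Char),
    PySem.Chars.split₀.go (s ++ ' ' :: t) cur [] =
      PySem.Chars.split₀.go s cur [] ++ PySem.Chars.split₀.go t [] [] := by
  have hsp : PySem.Chars.isspace ' ' = true := by decide
  intro s
  induction s with
  | nil =>
    intro cur
    rw [List.nil_append, pv_go_cons ' ' t cur [], pv_go_nil cur []]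
    by_cases h : cur.isEmpty
    · simp [hsp, h]
    · simp only [hsp, h, if_true, if_false, Bool.false_eq_true]
      rw [pv_go_acc t [] [cur.reverse]]
  | cons c rest ih =>
    intro cur
    rw [List.cons_append, pv_go_cons c (rest ++ ' ' :: t) cur [], pv_go_cons c rest cur []]
    by_cases hs : PySem.Chars.isspace c
    · by_cases h : cur.isEmpty
      · simp only [hs, h, if_true]
        exact ih []
      · simp only [hs, h, if_true, if_false, Bool.false_eq_true]
        rw [pv_go_acc (rest ++ ' ' :: t) [] [cur.reverse], pv_go_acc rest [] [cur.reverse], ih []]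
        simp
    · simp only [hs, Bool.false_eq_true, if_false]
      exact ih _

theorem pv_chars_split_join (ps : List (List Char)) :
    PySem.Chars.split₀ (PySem.Chars.join [' '] ps) = ps.flatMap PySem.Chars.split₀ := by
  induction ps with
  | nil => simp [PySem.Chars.join_nil, PySem.Chars.split₀, pv_go_nil []]
  | cons p rest ih =>
    cases rest with
    | nil => simp [PySem.Chars.join_singleton]
    | cons q rest' =>
      rw [PySem.Chars.join_cons_cons]
      have h : p ++ [' '] ++ PySem.Chars.join [' '] (q :: rest') =
          p ++ ' ' :: PySem.Chars.join [' '] (q :: rest') := by simp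
      rw [h]
      simp only [PySem.Chars.split₀] at *
      rw [pv_go_append_space _ p [], ih]
      simp [List.flatMap_cons, PySem.Chars.split₀]

theorem pv_str_split_join (ps : List String) :
    PySem.Str.split₀ (PySem.Str.join " " ps) = ps.flatMap PySem.Str.split₀ := by
  simp only [PySem.Str.split₀, PySem.Str.join, String.toList_ofList]
  have hsep : (" " : String).toList = [' '] := by decide
  rw [hsep, pv_chars_split_join]
  induction ps with
  | nil => simp
  | cons p rest ih => simp [List.flatMap_cons, ih, PySem.Str.split₀]

-- word-count transfer: counting a tagged pair equals counting the word in the v-selected stream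
theorem pv_count_tagged (v : Int) (w : String) : ∀ (l : List (Int × String)),
    l.count (v, w) =
      (l.filterMap (fun p => if p.1 == v then some p.2 else none)).count w := by
  intro l
  induction l with
  | nil => rfl
  | cons p rest ih =>
    obtain ⟨a, u⟩ := p
    by_cases ha : a = v
    · subst ha
      by_cases hu : u = w <;> simp [hu, ih, Prod.ext_iff]
    · have hne : ¬ ((a, u) = (v, w)) := by simp [Prod.ext_iff, ha]
      simp [hne, ha, ih]

-- first-occurrence transfer: the v-labelled part of the deduped pair stream is the
-- deduped v-selected word stream, tagged
theorem pv_ofList_filter (v : Int) : ∀ (l : List (Int × String))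
    (acc1 : List (Int × String)) (acc2 : List String),
    acc1.filter (fun k => k.1 == v) = acc2.map (fun w => (v, w)) →
    (List.foldl PySem.Set.add acc1 l).filter (fun k => k.1 == v) =
      (List.foldl PySem.Set.add acc2
        (l.filterMap (fun p => if p.1 == v then some p.2 else none))).map (fun w => (v, w)) := by
  intro l
  induction l with
  | nil => intro acc1 acc2 h; simpa using h
  | cons p rest ih =>
    intro acc1 acc2 h
    obtain ⟨a, u⟩ := p
    simp only [List.foldl_cons, List.filterMap_cons]
    by_cases hav : a = v
    · subst hav
      simp only [beq_self_eq_true, if_true, List.foldl_cons]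
      apply ih
      have hmem : ((a, u) ∈ acc1) ↔ (u ∈ acc2) := by
        constructor
        · intro hm
          have hm2 : (a, u) ∈ acc1.filter (fun k => k.1 == a) := by
            simp [List.mem_filter, hm]
          rw [h] at hm2
          simpa using hm2
        · intro hm
          have hm2 : (a, u) ∈ acc2.map (fun w => (a, w)) := List.mem_map_of_mem hm
          rw [← h] at hm2
          exact (List.mem_filter.mp hm2).1
      unfold PySem.Set.add PySem.Set.contains
      by_cases hc : u ∈ acc2
      · rw [if_pos (by simp [List.contains_eq_mem, hmem.mpr hc]),
           if_pos (by simp [List.contains_eq_mem, hc])]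
        exact h
      · rw [if_neg (by simp [List.contains_eq_mem, hmem, hc]),
           if_neg (by simp [List.contains_eq_mem, hc])]
        rw [List.filter_append, h]
        simp
    · have hbeq : (a == v) = false := by simp [hav]
      simp only [hbeq, Bool.false_eq_true, if_false]
      apply ih
      unfold PySem.Set.add PySem.Set.contains
      by_cases hc : (a, u) ∈ acc1
      · rw [if_pos (by simp [List.contains_eq_mem, hc])]
        exact h
      · rw [if_neg (by simp [List.contains_eq_mem, hc])]
        rw [List.filter_append, h]
        simp [hbeq]

-- the v-selection of the tagged stream is exactly A's v-word stream
theorem pv_select_tagged (texts : List String) (labels : List Int) (v : Int)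
    (hv : v = 0 ∨ v = 1) :
    ((PySem.List.pyRange 0 labels.length 1).flatMap (fun i =>
      if PySem.List.pyGetD labels i 0 == 0 || PySem.List.pyGetD labels i 0 == 1 then
        (PySem.Str.split₀ (PySem.List.pyGetD texts i "")).map
          (fun w => (PySem.List.pyGetD labels i 0, w))
      else [])).filterMap (fun p => if p.1 == v then some p.2 else none) =
    (((PySem.List.pyRange 0 labels.length 1).filter
        (fun i => PySem.List.pyGetD labels i 0 == v)).map
      (fun i => PySem.List.pyGetD texts i "")).flatMap PySem.Str.split₀ := by
  induction PySem.List.pyRange 0 labels.length 1 with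
  | nil => rfl
  | cons i rest ih =>
    simp only [List.flatMap_cons, List.filterMap_append, List.filter_cons]
    by_cases hiv : PySem.List.pyGetD labels i 0 = v
    · have h01 : (PySem.List.pyGetD labels i 0 == 0 || PySem.List.pyGetD labels i 0 == 1) = true := by
        rcases hv with h | h <;> simp [hiv, h]
      have hsome : ∀ w ∈ PySem.Str.split₀ (PySem.List.pyGetD texts i ""),
          ((fun p : Int × String => if p.1 == v then some p.2 else none) ∘
            (fun w => (PySem.List.pyGetD labels i 0, w))) w = some w := by
        intro w _; simp [Function.comp, hiv]
      rw [if_pos h01, if_pos (show (PySem.List.pyGetD labels i 0 == v) = true by simp [hiv]),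
        List.map_cons, List.flatMap_cons, List.filterMap_map,
        List.filterMap_congr hsome, List.filterMap_some, ih]
    · rw [if_neg (show ¬ (PySem.List.pyGetD labels i 0 == v) = true by simp [hiv])]
      by_cases h01 : (PySem.List.pyGetD labels i 0 == 0 || PySem.List.pyGetD labels i 0 == 1) = true
      · rw [if_pos h01, List.filterMap_map]
        have hnone : ∀ w ∈ PySem.Str.split₀ (PySem.List.pyGetD texts i ""),
            ((fun p : Int × String => if p.1 == v then some p.2 else none) ∘
              (fun w => (PySem.List.pyGetD labels i 0, w))) w = none := by
          intro w _; simp [Function.comp, hiv]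
        rw [List.filterMap_congr hnone]
        simpa using ih
      · rw [if_neg h01]
        simpa using ih

-- one output side of B equals the corresponding side of A (counter of the v-word stream)
theorem pv_side (texts : List String) (labels : List Int) (v : Int) (hv : v = 0 ∨ v = 1) :
    (((PySem.Dict.counter ((PySem.List.pyRange 0 labels.length 1).flatMap (fun i =>
        if PySem.List.pyGetD labels i 0 == 0 || PySem.List.pyGetD labels i 0 == 1 then
          (PySem.Str.split₀ (PySem.List.pyGetD texts i "")).map
            (fun w => (PySem.List.pyGetD labels i 0, w))
        else []))).items.filter (fun p => p.1.1 == v)).map (fun p => (p.1.2, p.2))) =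
    (PySem.Dict.counter
      (PySem.Str.split₀ (PySem.Str.join " "
        (((PySem.List.pyRange 0 labels.length 1).filter
            (fun i => PySem.List.pyGetD labels i 0 == v)).map
          (fun i => PySem.List.pyGetD texts i ""))))).items := by
  set tagged := (PySem.List.pyRange 0 labels.length 1).flatMap (fun i =>
    if PySem.List.pyGetD labels i 0 == 0 || PySem.List.pyGetD labels i 0 == 1 then
      (PySem.Str.split₀ (PySem.List.pyGetD texts i "")).map
        (fun w => (PySem.List.pyGetD labels i 0, w))
    else []) with htag
  rw [pv_str_split_join, PySem.Dict.items_counter, PySem.Dict.items_counter]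
  rw [← pv_select_tagged texts labels v hv, ← htag]
  rw [List.filter_map]
  have hfil : (PySem.Set.ofList tagged).filter (fun k => k.1 == v) =
      (PySem.Set.ofList (tagged.filterMap
        (fun p => if p.1 == v then some p.2 else none))).map (fun w => (v, w)) := by
    have := pv_ofList_filter v tagged [] [] (by simp)
    simpa [PySem.Set.ofList, PySem.Set.empty] using this
  have hpred : ((fun p : (Int × String) × Int => p.1.1 == v) ∘
      (fun k : Int × String => (k, (tagged.count k : Int)))) = (fun k => k.1 == v) := rfl
  rw [hpred, hfil, List.map_map, List.map_map]
  apply List.map_congr_left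
  intro w _
  simp [Function.comp, pv_count_tagged v w tagged]

-- ===== VERDICT (by name: the statement is the Claim_ definition above) =====
theorem build_frequency_dict_spec : Claim_equal_build_frequency_dict := by
  intro texts labels _ _
  unfold Spec_build_frequency_dict build_frequency_dict build_frequency_dict_alt
  dsimp only []
  rw [pv_side texts labels 1 (Or.inr rfl), pv_side texts labels 0 (Or.inl rfl)]
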